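-- pv_equiv track=rewrite | github.com/IsmaelBortoluzzi/Log-Redo | main.py | get_starts_after_empty_ckpt
-- ===== SOURCE A (Python) =====
-- def get_transaction_from_start_or_commit(line):
--     return line.split(' ')[-1]
--
-- def get_starts_after_empty_ckpt(transactions_in_ckpt, lines):
--     all_transactions_to_work = set()
--     lines_reversed = reversed(lines)
--     index = len(lines) - 1
--
--     for line in lines_reversed:
--         if line.startswith('CKPT'):
--             break
--
--         if line.startswith('start'):
--             transaction = get_transaction_from_start_or_commit(line)
--             all_transactions_to_work.add(transaction)
--             if transaction in transactions_in_ckpt: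
--                 transactions_in_ckpt.remove(transaction)
--
--         index -= 1
--
--     return all_transactions_to_work, index + 1
-- ===== SOURCE B (Python) =====
-- def get_starts_after_empty_ckpt(transactions_in_ckpt, lines):
--     # Phase 1: locate the last checkpoint line (index of the last 'CKPT' line, -1 if none).
--     ckpt_index = -1
--     for i, line in enumerate(lines):
--         if line.startswith('CKPT'):
--             ckpt_index = i
--     # Phase 2: collect started transactions from the tail after the checkpoint
--     # (scanned back-to-front), removing each from transactions_in_ckpt if present.
--     started = set()
--     for line in reversed(lines[ckpt_index + 1:]):
--         if line.startswith('start'):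
--             transaction = line.split(' ')[-1]
--             started.add(transaction)
--             if transaction in transactions_in_ckpt:
--                 transactions_in_ckpt.remove(transaction)
--     return started, ckpt_index + 1
-- ===== Notes on version B (the rewrite author's own statement) =====
-- stated objective: alternative
-- what changed: Replaced A's single reverse loop with a running index counter and a break at the checkpoint by a two-phase decomposition: a forward enumerate that locates the index of the last 'CKPT' line, then a scan of the slice after it collecting started transactions.
import Mathlib
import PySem

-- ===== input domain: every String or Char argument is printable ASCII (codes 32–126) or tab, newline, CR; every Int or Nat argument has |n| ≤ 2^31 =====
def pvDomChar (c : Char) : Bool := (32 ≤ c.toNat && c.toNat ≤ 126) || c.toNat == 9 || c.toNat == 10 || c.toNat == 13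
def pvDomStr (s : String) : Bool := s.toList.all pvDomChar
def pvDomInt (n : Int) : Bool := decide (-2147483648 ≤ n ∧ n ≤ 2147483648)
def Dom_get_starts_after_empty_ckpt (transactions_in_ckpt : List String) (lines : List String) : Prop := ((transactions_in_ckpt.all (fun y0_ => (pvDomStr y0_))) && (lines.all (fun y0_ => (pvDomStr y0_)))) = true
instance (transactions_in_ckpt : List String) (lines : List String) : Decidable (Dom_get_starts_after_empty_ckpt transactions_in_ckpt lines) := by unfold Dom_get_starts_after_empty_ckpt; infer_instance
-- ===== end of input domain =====

-- B replaces A's single reverse loop (running counter + break at the checkpoint) with a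
-- locate-then-scan decomposition: first find the index of the last 'CKPT' line by a forward
-- enumerate, then scan the slice after it (objective: alternative decomposition; same cost).
-- Both Pythons mutate transactions_in_ckpt in place identically; the equivalence proved here
-- is about the RETURN value only (both B and its port perform the same removals).

-- ===== PORT A =====
-- helper get_transaction_from_start_or_commit: line.split(' ')[-1]
def pvGetTransaction (line : String) : String :=
  (PySem.List.pyGet? ((PySem.Str.split? line " ").getD []) (-1)).getD ""

-- A's loop over reversed(lines): state = (transactions_in_ckpt, result set, index); break on CKPT
def pvLoopA : List String → List String → PySem.Set String → Int → PySem.Set String × Int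
  | [], _, s, index => (s, index + 1)
  | line :: rest, t, s, index =>
    if PySem.Str.startswith line "CKPT" then (s, index + 1)
    else if PySem.Str.startswith line "start" then
      let transaction := pvGetTransaction line
      pvLoopA rest (if t.contains transaction then (PySem.List.remove? t transaction).getD t else t)
        (PySem.Set.add s transaction) (index - 1)
    else pvLoopA rest t s (index - 1)

def get_starts_after_empty_ckpt (transactions_in_ckpt : List String) (lines : List String) : List String × Int :=
  pvLoopA lines.reverse transactions_in_ckpt PySem.Set.empty ((lines.length : Int) - 1)

-- ===== PORT B =====
-- phase 1: forward enumerate, remember the index of the last line starting with 'CKPT'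
def pvCkptIndex : List String → Int → Int → Int
  | [], _, ck => ck
  | line :: rest, i, ck =>
    pvCkptIndex rest (i + 1) (if PySem.Str.startswith line "CKPT" then i else ck)

-- phase 2: scan (a list of lines) collecting started transactions, removing them from t
def pvLoopB : List String → List String → PySem.Set String → PySem.Set String
  | [], _, s => s
  | line :: rest, t, s =>
    if PySem.Str.startswith line "start" then
      let transaction := (PySem.List.pyGet? ((PySem.Str.split? line " ").getD []) (-1)).getD ""
      pvLoopB rest (if t.contains transaction then (PySem.List.remove? t transaction).getD t else t)
        (PySem.Set.add s transaction)
    else pvLoopB rest t s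

def get_starts_after_empty_ckpt_alt (transactions_in_ckpt : List String) (lines : List String) : List String × Int :=
  let ck := pvCkptIndex lines 0 (-1)
  (pvLoopB (PySem.List.slice lines (some (ck + 1)) none).reverse transactions_in_ckpt PySem.Set.empty, ck + 1)

-- ===== PRECONDITION & SPEC =====
def Spec_get_starts_after_empty_ckpt (transactions_in_ckpt : List String) (lines : List String) (out : List String × Int) : Prop := out = get_starts_after_empty_ckpt_alt transactions_in_ckpt lines
instance (transactions_in_ckpt : List String) (lines : List String) (out : List String × Int) : Decidable (Spec_get_starts_after_empty_ckpt transactions_in_ckpt lines out) := by unfold Spec_get_starts_after_empty_ckpt; infer_instance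

-- ===== CLAIM (what is proved, stated in full; the proofs are below) =====
def Claim_equal_get_starts_after_empty_ckpt : Prop := ∀ (transactions_in_ckpt : List String) (lines : List String), Dom_get_starts_after_empty_ckpt transactions_in_ckpt lines → Spec_get_starts_after_empty_ckpt transactions_in_ckpt lines (get_starts_after_empty_ckpt transactions_in_ckpt lines)

-- ===== LEMMAS AND PROOFS =====

-- A's loop equals B's phase-2 loop run on the prefix of the reversed lines before the first
-- CKPT line, paired with the index decremented once per processed line.
theorem pvLoopA_eq_loopB (r : List String) : ∀ (t : List String) (s : PySem.Set String) (i : Int),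
    pvLoopA r t s i
      = (pvLoopB (r.takeWhile (fun l => !PySem.Str.startswith l "CKPT")) t s,
         i - (r.takeWhile (fun l => !PySem.Str.startswith l "CKPT")).length + 1) := by
  induction r with
  | nil => intro t s i; simp only [pvLoopA, pvLoopB, List.takeWhile_nil, List.length_nil,
      Nat.cast_zero, sub_zero]
  | cons line rest ih =>
    intro t s i
    simp only [pvLoopA, List.takeWhile_cons]
    by_cases hc : PySem.Str.startswith line "CKPT"
    · simp only [hc, Bool.not_true, Bool.false_eq_true, if_false, ite_true, pvLoopB,
        List.length_nil, Nat.cast_zero, sub_zero]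
    · rw [Bool.not_eq_true] at hc
      by_cases hs : PySem.Str.startswith line "start"
      · simp only [hc, hs, Bool.not_false, Bool.false_eq_true, if_false, ite_true, pvLoopB,
          List.length_cons, pvGetTransaction, ih, Prod.mk.injEq]
        exact ⟨trivial, by push_cast; omega⟩
      · rw [Bool.not_eq_true] at hs
        simp only [hc, hs, Bool.not_false, Bool.false_eq_true, if_false, ite_true, pvLoopB,
          List.length_cons, ih, Prod.mk.injEq]
        exact ⟨trivial, by push_cast; omega⟩

-- pvCkptIndex on an appended last element
theorem pvCkptIndex_append (ys : List String) (a : String) : ∀ (i c : Int),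
    pvCkptIndex (ys ++ [a]) i c
      = if PySem.Str.startswith a "CKPT" then i + ys.length else pvCkptIndex ys i c := by
  induction ys with
  | nil => intro i c; simp [pvCkptIndex]
  | cons y ys ih =>
    intro i c
    simp only [List.cons_append, pvCkptIndex, ih, List.length_cons]
    split_ifs <;> push_cast <;> ring_nf

-- the last-CKPT index is lines.length - 1 - (length of the CKPT-free suffix), uniformly (-1 if none)
theorem pvCkptIndex_eq (lines : List String) :
    pvCkptIndex lines 0 (-1)
      = (lines.length : Int) - 1 - (lines.reverse.takeWhile (fun l => !PySem.Str.startswith l "CKPT")).length := by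
  induction lines using List.reverseRecOn with
  | nil => simp [pvCkptIndex]
  | append_singleton ys a ih =>
    rw [pvCkptIndex_append]
    rw [List.reverse_append, List.reverse_singleton, List.singleton_append, List.takeWhile_cons]
    by_cases hc : PySem.Str.startswith a "CKPT"
    · rw [if_pos hc, hc]
      simp
    · rw [if_neg hc]
      rw [Bool.not_eq_true] at hc
      rw [hc, ih]
      simp only [Bool.not_false, ite_true, List.length_cons, List.length_append,
        List.length_nil]
      push_cast
      omega

-- the slice after the checkpoint, reversed, is exactly the CKPT-free prefix of the reversed lines
theorem slice_after_ckpt (lines : List String) :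
    (PySem.List.slice lines (some (pvCkptIndex lines 0 (-1) + 1)) none).reverse
      = lines.reverse.takeWhile (fun l => !PySem.Str.startswith l "CKPT") := by
  set p : String → Bool := fun l => !PySem.Str.startswith l "CKPT" with hp
  have hk : (lines.reverse.takeWhile p).length ≤ lines.length := by
    have h1 := (List.takeWhile_sublist (l := lines.reverse) (p := p)).length_le
    simpa using h1
  rw [pvCkptIndex_eq]
  have h0 : (0 : Int) ≤ (lines.length : Int) - 1 - (lines.reverse.takeWhile p).length + 1 := by
    omega
  rw [PySem.List.slice_from _ h0]
  have htn : ((lines.length : Int) - 1 - (lines.reverse.takeWhile p).length + 1).toNat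
      = lines.length - (lines.reverse.takeWhile p).length := by omega
  rw [htn]
  have hpre : lines.reverse.take (lines.reverse.takeWhile p).length = lines.reverse.takeWhile p :=
    (List.prefix_iff_eq_take.mp (List.takeWhile_prefix p)).symm
  have hdrop : lines.drop (lines.length - (lines.reverse.takeWhile p).length)
      = (lines.reverse.take (lines.reverse.takeWhile p).length).reverse := by
    rw [List.take_reverse, List.reverse_reverse]
  rw [hdrop, hpre, List.reverse_reverse]

-- ===== VERDICT (by name: the statement is the Claim_ definition above) =====
theorem get_starts_after_empty_ckpt_spec : Claim_equal_get_starts_after_empty_ckpt := by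
  intro t lines _
  show _ = _
  unfold get_starts_after_empty_ckpt get_starts_after_empty_ckpt_alt
  rw [pvLoopA_eq_loopB]
  show _ = (pvLoopB (PySem.List.slice lines (some (pvCkptIndex lines 0 (-1) + 1))).reverse
      t PySem.Set.empty, pvCkptIndex lines 0 (-1) + 1)
  rw [slice_after_ckpt, pvCkptIndex_eq, Prod.mk.injEq]
  exact ⟨rfl, by ring⟩
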